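-- pv_equiv track=rewrite | github.com/narasul/agentic-ner | src/ner/tagger.py | _get_first_and_last_index
-- ===== SOURCE A (Python) =====
-- from typing import List, Any, Dict, Tuple
--
-- def _get_first_and_last_index(
--     entity_tokens: List[str], tokens: List[str]
-- ) -> Tuple[int, int]:
--     tokens = [token.lower() for token in tokens]
--     entity_tokens = [token.lower() for token in entity_tokens]
--
--     # Find the longest consecutive sequence matching entity_tokens inside tokens
--     max_length = 0
--     best_start_index = -1
--
--     # Iterate through all possible lengths up to the full entity_tokens length
--     for end_b in range(1, len(entity_tokens) + 1):
--         candidate = entity_tokens[:end_b]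
--
--         for start_b in range(len(tokens) - end_b + 1):
--             if tokens[start_b : start_b + end_b] == candidate:
--                 if end_b > max_length:
--                     max_length = end_b
--                     best_start_index = start_b
--                 break
--
--     if max_length == 0:
--         return -1, -1
--
--     return best_start_index, best_start_index + max_length - 1
-- ===== SOURCE B (Python) =====
-- from typing import List, Tuple
--
--
-- def _lcp(e: List[str], ts: List[str], i: int) -> int:
--     # length of the longest prefix of e matching ts starting at position i
--     j = 0
--     while j < len(e) and i + j < len(ts) and ts[i + j] == e[j]:
--         j += 1
--     return j
--
--
-- def _get_first_and_last_index(
--     entity_tokens: List[str], tokens: List[str]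
-- ) -> Tuple[int, int]:
--     e = [token.lower() for token in entity_tokens]
--     ts = [token.lower() for token in tokens]
--
--     best_len = 0
--     best_start = -1
--     # One pass over start positions: matched-prefix length at each start,
--     # keep the maximum length with its earliest start.
--     for i in range(len(ts)):
--         j = _lcp(e, ts, i)
--         if j > best_len:
--             best_len = j
--             best_start = i
--
--     if best_len == 0:
--         return -1, -1
--
--     return best_start, best_start + best_len - 1
-- ===== Notes on version B (the rewrite author's own statement) =====
-- stated objective: faster
-- what changed: Replaces A's loop over all prefix lengths (each rescanning and re-slicing tokens) by a single pass over start positions that computes the matched-prefix length at each start and keeps the maximum with its earliest start.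
import Mathlib
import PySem

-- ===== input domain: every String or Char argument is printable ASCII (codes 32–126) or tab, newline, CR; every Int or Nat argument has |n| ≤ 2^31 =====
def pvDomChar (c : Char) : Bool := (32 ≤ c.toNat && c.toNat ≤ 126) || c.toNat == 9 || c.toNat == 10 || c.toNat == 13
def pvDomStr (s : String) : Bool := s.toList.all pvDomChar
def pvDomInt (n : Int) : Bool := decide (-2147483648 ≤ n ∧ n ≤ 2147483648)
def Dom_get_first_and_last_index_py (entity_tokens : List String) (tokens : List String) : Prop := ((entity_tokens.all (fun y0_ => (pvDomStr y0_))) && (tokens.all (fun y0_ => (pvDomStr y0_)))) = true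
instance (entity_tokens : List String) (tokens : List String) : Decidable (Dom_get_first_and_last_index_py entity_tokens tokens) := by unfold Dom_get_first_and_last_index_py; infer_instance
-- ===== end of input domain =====

-- B replaces A's scan per prefix length by ONE pass over start positions (matched-prefix
-- length at each start, maximum with earliest start): same return value, fewer passes.

-- ===== PORT A =====
-- literal transliteration of _get_first_and_last_index (Source A); the inner 'for start_b …:
-- if slice == candidate: …; break' is the first matching start, i.e. find?.
def get_first_and_last_index_py (entity_tokens : List String) (tokens : List String) : List Int :=
  let T := tokens.map PySem.Str.lower
  let E := entity_tokens.map PySem.Str.lower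
  let st := (PySem.List.pyRange 1 ((E.length : Int) + 1) 1).foldl
    (fun (s : Int × Int) endb =>
      let candidate := PySem.List.slice E none (some endb)
      match (PySem.List.pyRange 0 ((T.length : Int) - endb + 1) 1).find?
          (fun sb => PySem.List.slice T (some sb) (some (sb + endb)) == candidate) with
      | some sb => if endb > s.1 then (endb, sb) else s
      | none => s)
    ((0 : Int), (-1 : Int))
  if st.1 == 0 then [-1, -1] else [st.2, st.2 + st.1 - 1]

-- ===== PORT B =====
-- _lcp(e, ts, i): 'while j < len(e) and i+j < len(ts) and ts[i+j] == e[j]: j += 1' is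
-- exactly this structural recursion on e and on ts from position i (ts.drop i, 0 ≤ i).
def pvLcp : List String → List String → Int
  | a :: as_, b :: bs => if b == a then 1 + pvLcp as_ bs else 0
  | _, _ => 0

def get_first_and_last_index_py_alt (entity_tokens : List String) (tokens : List String) : List Int :=
  let E := entity_tokens.map PySem.Str.lower
  let T := tokens.map PySem.Str.lower
  let st := (List.range T.length).foldl
    (fun (s : Int × Int) i =>
      let j := pvLcp E (T.drop i)
      if j > s.1 then (j, (i : Int)) else s)
    ((0 : Int), (-1 : Int))
  if st.1 == 0 then [-1, -1] else [st.2, st.2 + st.1 - 1]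

-- ===== PRECONDITION & SPEC =====
def Spec_get_first_and_last_index_py (entity_tokens : List String) (tokens : List String) (out : List Int) : Prop := out = get_first_and_last_index_py_alt entity_tokens tokens
instance (entity_tokens : List String) (tokens : List String) (out : List Int) : Decidable (Spec_get_first_and_last_index_py entity_tokens tokens out) := by unfold Spec_get_first_and_last_index_py; infer_instance

-- ===== CLAIM (what is proved, stated in full; the proofs are below) =====
def Claim_equal_get_first_and_last_index_py : Prop := ∀ (entity_tokens : List String) (tokens : List String), Dom_get_first_and_last_index_py entity_tokens tokens → Spec_get_first_and_last_index_py entity_tokens tokens (get_first_and_last_index_py entity_tokens tokens)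

-- ===== LEMMAS AND PROOFS =====

-- running maximum of m over [0, n), floored at 0
def pvMax (m : Nat → Int) : Nat → Int
  | 0 => 0
  | n + 1 => max (pvMax m n) (m n)

-- first argmax as B's fold tracks it (-1 when the max is 0)
def pvArg (m : Nat → Int) : Nat → Int
  | 0 => -1
  | n + 1 => if m n > pvMax m n then (n : Int) else pvArg m n

-- first index i < n with v ≤ m i
def pvFirstGe (m : Nat → Int) (v : Int) (n : Nat) : Option Nat :=
  (List.range n).find? (fun i => v ≤ m i)

lemma find?_congr_mem {α : Type} (l : List α) (p q : α → Bool) (h : ∀ x ∈ l, p x = q x) :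
    l.find? p = l.find? q := by
  induction l with
  | nil => rfl
  | cons x xs ih =>
    simp only [List.find?_cons]
    rw [h x (List.mem_cons_self)]
    split
    · rfl
    · exact ih (fun y hy => h y (List.mem_cons_of_mem _ hy))

lemma pvLcp_nonneg : ∀ a b : List String, 0 ≤ pvLcp a b := by
  intro a
  induction a with
  | nil => intro b; simp [pvLcp]
  | cons x as ih =>
    intro b
    cases b with
    | nil => simp [pvLcp]
    | cons y bs =>
      simp only [pvLcp]
      split
      · have := ih bs; omega
      · omega

lemma pvLcp_le_left : ∀ a b : List String, pvLcp a b ≤ (a.length : Int) := by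
  intro a
  induction a with
  | nil => intro b; simp [pvLcp]
  | cons x as ih =>
    intro b
    cases b with
    | nil => simp [pvLcp]; positivity
    | cons y bs =>
      simp only [pvLcp, List.length_cons]
      split
      · have := ih bs; push_cast; omega
      · push_cast; positivity

lemma pvLcp_le_right : ∀ a b : List String, pvLcp a b ≤ (b.length : Int) := by
  intro a
  induction a with
  | nil => intro b; cases b <;> (simp [pvLcp]; try positivity)
  | cons x as ih =>
    intro b
    cases b with
    | nil => simp [pvLcp]
    | cons y bs =>
      simp only [pvLcp, List.length_cons]
      split
      · have := ih bs; push_cast; omega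
      · push_cast; positivity

-- prefix-slice equality at a start is exactly 'the matched length reaches L'
lemma take_beq_iff : ∀ (L : Nat) (a b : List String), L ≤ a.length →
    ((b.take L == a.take L) = decide ((L : Int) ≤ pvLcp a b)) := by
  intro L
  induction L with
  | zero => intro a b _; simpa using (pvLcp_nonneg a b)
  | succ L ih =>
    intro a b h
    cases a with
    | nil => simp at h
    | cons x as =>
      cases b with
      | nil =>
        simp [pvLcp]
      | cons y bs =>
        simp only [List.take_succ_cons, List.cons_beq_cons, pvLcp]
        by_cases hxy : (y == x) = true
        · simp only [hxy, Bool.true_and, if_pos]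
          rw [ih as bs (by simpa using h)]
          have := pvLcp_nonneg as bs
          by_cases hc : (L : Int) ≤ pvLcp as bs
          · simp only [hc, decide_true]
            symm; simp only [decide_eq_true_iff]; push_cast; omega
          · simp only [hc, decide_false]
            symm; simp only [decide_eq_false_iff_not]; push_cast at hc ⊢; omega
        · simp only [hxy, Bool.false_and, if_neg (by simp : ¬ (false = true))]
          symm
          simp only [decide_eq_false_iff_not]
          omega

lemma pvMax_nonneg (m : Nat → Int) : ∀ n, 0 ≤ pvMax m n := by
  intro n
  induction n with
  | zero => simp [pvMax]
  | succ n ih => simp only [pvMax]; omega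

lemma le_pvMax (m : Nat → Int) : ∀ n j, j < n → m j ≤ pvMax m n := by
  intro n
  induction n with
  | zero => omega
  | succ n ih =>
    intro j hj
    simp only [pvMax]
    rcases Nat.lt_succ_iff_lt_or_eq.mp hj with h | h
    · have := ih j h; omega
    · subst h; omega

lemma pvMax_le (m : Nat → Int) (c : Int) (hc : 0 ≤ c) (h : ∀ j, m j ≤ c) : ∀ n, pvMax m n ≤ c := by
  intro n
  induction n with
  | zero => simpa [pvMax]
  | succ n ih => simp only [pvMax]; have := h n; omega

lemma pvMax_exists (m : Nat → Int) : ∀ n, pvMax m n = 0 ∨ ∃ j, j < n ∧ m j = pvMax m n := by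
  intro n
  induction n with
  | zero => left; rfl
  | succ n ih =>
    by_cases h : m n ≥ pvMax m n
    · right; exact ⟨n, by omega, by simp only [pvMax]; omega⟩
    · have heq : pvMax m (n + 1) = pvMax m n := by simp only [pvMax]; omega
      rcases ih with h0 | ⟨j, hj, hm⟩
      · left; omega
      · right; exact ⟨j, by omega, by omega⟩

lemma pvFirstGe_succ (m : Nat → Int) (v : Int) (n : Nat) :
    pvFirstGe m v (n + 1) = (pvFirstGe m v n).or (if v ≤ m n then some n else none) := by
  simp only [pvFirstGe, List.range_succ, List.find?_append]
  congr 1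
  simp [List.find?]
  split <;> simp_all

lemma pvFirstGe_none (m : Nat → Int) (v : Int) (n : Nat) (h : ∀ j, j < n → ¬ v ≤ m j) :
    pvFirstGe m v n = none := by
  simp only [pvFirstGe, List.find?_eq_none]
  intro j hj
  simp only [List.mem_range] at hj
  simpa using h j hj

lemma pvFirstGe_isSome (m : Nat → Int) (v : Int) (n : Nat) (h : ∃ j, j < n ∧ v ≤ m j) :
    ∃ i, pvFirstGe m v n = some i := by
  rcases h with ⟨j, hj, hv⟩
  have hs : ((List.range n).find? (fun i => decide (v ≤ m i))).isSome = true :=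
    List.find?_isSome.mpr ⟨j, List.mem_range.mpr hj, by simpa using hv⟩
  rcases Option.isSome_iff_exists.mp hs with ⟨i, hi⟩
  exact ⟨i, hi⟩

-- B's fold computes (pvMax, pvArg)
lemma bfold (m : Nat → Int) : ∀ n,
    (List.range n).foldl (fun (s : Int × Int) i => if m i > s.1 then (m i, (i : Int)) else s) ((0 : Int), (-1 : Int))
      = (pvMax m n, pvArg m n) := by
  intro n
  induction n with
  | zero => rfl
  | succ n ih =>
    rw [List.range_succ, List.foldl_append, ih]
    simp only [List.foldl_cons, List.foldl_nil, pvMax, pvArg]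
    by_cases h : m n > pvMax m n
    · rw [if_pos (by simpa using h), if_pos h]
      congr 1; omega
    · rw [if_neg (by simpa using h), if_neg h]
      congr 1; omega

-- pvArg in terms of the first index reaching the maximum
lemma pvArg_char (m : Nat → Int) : ∀ n,
    pvArg m n = (if pvMax m n = 0 then (-1 : Int)
                 else match pvFirstGe m (pvMax m n) n with
                      | some i => (i : Int)
                      | none => -1) := by
  intro n
  induction n with
  | zero => rfl
  | succ n ih =>
    by_cases h : m n > pvMax m n
    · have hp : pvMax m (n + 1) = m n := by simp only [pvMax]; omega
      have hpos : pvMax m (n + 1) ≠ 0 := by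
        have := pvMax_nonneg m n; omega
      have hnone : pvFirstGe m (m n) n = none :=
        pvFirstGe_none m _ n (fun j hj => by have := le_pvMax m n j hj; omega)
      simp only [pvArg, if_pos h, hp, pvFirstGe_succ, hnone, Option.none_or]
      rw [if_pos le_rfl, if_neg (show ¬ m n = 0 by have := pvMax_nonneg m n; omega)]
    · have hp : pvMax m (n + 1) = pvMax m n := by simp only [pvMax]; omega
      simp only [pvArg, if_neg h, hp, ih]
      by_cases h0 : pvMax m n = 0
      · simp [h0]
      · rw [if_neg h0, if_neg h0]
        rcases pvMax_exists m n with hq | ⟨j, hj, hm⟩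
        · omega
        · rcases pvFirstGe_isSome m (pvMax m n) n ⟨j, hj, by omega⟩ with ⟨i, hi⟩
          rw [pvFirstGe_succ, hi]
          simp

-- A's inner loop (first start whose L-slice matches the L-prefix) = pvFirstGe
lemma inner_find (E T : List String) (L : Nat) (hL1 : 1 ≤ L) (hLE : L ≤ E.length) :
    ((PySem.List.pyRange 0 ((T.length : Int) - (L : Int) + 1) 1).find?
        (fun sb => PySem.List.slice T (some sb) (some (sb + (L : Int))) == PySem.List.slice E none (some (L : Int))))
      = (pvFirstGe (fun i => pvLcp E (T.drop i)) (L : Int) T.length).map (fun i => (i : Int)) := by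
  have hpred : ∀ sb : Nat,
      (PySem.List.slice T (some ((0 : Int) + (sb : Int))) (some ((0 : Int) + (sb : Int) + (L : Int))) == PySem.List.slice E none (some (L : Int)))
        = decide ((L : Int) ≤ pvLcp E (T.drop sb)) := by
    intro sb
    rw [show ((0 : Int) + (sb : Int)) = ((sb : Nat) : Int) by ring]
    rw [PySem.List.slice_natCast_add, PySem.List.slice_to_natCast]
    exact take_beq_iff L E (T.drop sb) hLE
  have hn1 : ((T.length : Int) - (L : Int) + 1).toNat ≤ T.length := by omega
  obtain ⟨d, hd⟩ : ∃ d, T.length = ((T.length : Int) - (L : Int) + 1).toNat + d :=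
    ⟨T.length - ((T.length : Int) - (L : Int) + 1).toNat, by omega⟩
  set n1 : Nat := ((T.length : Int) - (L : Int) + 1).toNat with hn1def
  have htail : ∀ k : Nat, n1 + k < T.length → ¬ ((L : Int) ≤ pvLcp E (T.drop (n1 + k))) := by
    intro k hk
    have hb := pvLcp_le_right E (T.drop (n1 + k))
    rw [List.length_drop] at hb
    have hcast : ((T.length - (n1 + k) : Nat) : Int) = (T.length : Int) - (n1 + k : Nat) := by
      push_cast; omega
    rw [hcast] at hb
    have hge : ((n1 : Nat) : Int) ≥ (T.length : Int) - (L : Int) + 1 := by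
      rw [hn1def]; exact Int.self_le_toNat _
    push_cast at hb hge ⊢
    omega
  rw [PySem.List.pyRange_one]
  have hB : (((T.length : Int) - (L : Int) + 1) - 0).toNat = n1 := by rw [hn1def]; omega
  rw [hB, List.find?_map]
  unfold pvFirstGe
  rw [hd, List.range_add, List.find?_append]
  have h2 : (List.find? (fun i => decide ((L : Int) ≤ pvLcp E (T.drop i))) ((List.range d).map (n1 + ·))) = none := by
    rw [List.find?_eq_none]
    intro j hj
    simp only [List.mem_map, List.mem_range] at hj
    obtain ⟨k, hk, rfl⟩ := hj
    simpa using htail k (by omega)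
  rw [h2, Option.or_none]
  have h3 : (List.find? ((fun sb => PySem.List.slice T (some sb) (some (sb + (L : Int))) == PySem.List.slice E none (some (L : Int))) ∘ fun k : Nat => (0 : Int) + (k : Int)) (List.range n1))
      = (List.find? (fun i => decide ((L : Int) ≤ pvLcp E (T.drop i))) (List.range n1)) := by
    exact find?_congr_mem _ _ _ (fun sb _ => hpred sb)
  rw [h3]
  rcases hfo : List.find? (fun i => decide ((L : Int) ≤ pvLcp E (T.drop i))) (List.range n1) with _ | i
  · simp
  · simp

-- A's outer fold state after the first n lengths
lemma afold (E T : List String) : ∀ n, n ≤ E.length →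
    ((List.range n).foldl
      (fun (s : Int × Int) (K : Nat) =>
        let endb : Int := 1 + (K : Int)
        let candidate := PySem.List.slice E none (some endb)
        match (PySem.List.pyRange 0 ((T.length : Int) - endb + 1) 1).find?
            (fun sb => PySem.List.slice T (some sb) (some (sb + endb)) == candidate) with
        | some sb => if endb > s.1 then (endb, sb) else s
        | none => s)
      ((0 : Int), (-1 : Int)))
    = (min (n : Int) (pvMax (fun i => pvLcp E (T.drop i)) T.length),
       if min (n : Int) (pvMax (fun i => pvLcp E (T.drop i)) T.length) = 0 then (-1 : Int)
       else match pvFirstGe (fun i => pvLcp E (T.drop i)) (min (n : Int) (pvMax (fun i => pvLcp E (T.drop i)) T.length)) T.length with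
            | some i => (i : Int)
            | none => -1) := by
  intro n hn
  set m : Nat → Int := fun i => pvLcp E (T.drop i) with hm
  set M : Int := pvMax m T.length with hM
  have hM0 : 0 ≤ M := pvMax_nonneg m T.length
  induction n with
  | zero =>
    simp only [List.range_zero, List.foldl_nil, Nat.cast_zero]
    rw [min_eq_left hM0, if_pos rfl]
  | succ n ih =>
    rw [List.range_succ, List.foldl_append, ih (by omega), List.foldl_cons, List.foldl_nil]
    have hcast : (1 + (n : Int)) = (((n + 1 : Nat)) : Int) := by push_cast; ring
    simp only [hcast]
    rw [inner_find E T (n + 1) (by omega) (by omega), ← hm]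
    by_cases hle : ((n + 1 : Nat) : Int) ≤ M
    · have hpos : (0 : Int) < M := by push_cast at hle; omega
      obtain ⟨j, hj, hmj⟩ : ∃ j, j < T.length ∧ m j = M := by
        rcases pvMax_exists m T.length with h0 | h
        · rw [← hM] at h0; omega
        · rw [← hM] at h; exact h
      obtain ⟨i, hi⟩ := pvFirstGe_isSome m (((n + 1 : Nat)) : Int) T.length ⟨j, hj, by omega⟩
      push_cast at hi hle
      have hminn : min ((n : Nat) : Int) M = (n : Int) := min_eq_left (by omega)
      have hminn1 : min ((n : Int) + 1) M = (n : Int) + 1 := min_eq_left (by omega)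
      have hne : ¬ ((n : Int) + 1 = 0) := by omega
      simp [hminn, hminn1, hi, hne]
    · have hnone : pvFirstGe m (((n + 1 : Nat)) : Int) T.length = none := by
        apply pvFirstGe_none
        intro j hj
        have := le_pvMax m T.length j hj
        rw [← hM] at this
        omega
      push_cast at hnone hle
      have h1 : min ((n : Nat) : Int) M = M := min_eq_right (by omega)
      have h2 : min ((n : Int) + 1) M = M := min_eq_right (by omega)
      simp [hnone, h1, h2]

-- ===== VERDICT (by name: the statement is the Claim_ definition above) =====
theorem get_first_and_last_index_py_spec : Claim_equal_get_first_and_last_index_py := by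
  intro entity_tokens tokens _
  unfold Spec_get_first_and_last_index_py get_first_and_last_index_py get_first_and_last_index_py_alt
  set T : List String := tokens.map PySem.Str.lower with hT
  set E : List String := entity_tokens.map PySem.Str.lower with hE
  set m : Nat → Int := fun i => pvLcp E (T.drop i) with hm
  have hrange : PySem.List.pyRange 1 ((E.length : Int) + 1) 1
      = (List.range E.length).map (fun k : Nat => 1 + (k : Int)) := by
    have hlen : (((E.length : Int) + 1) - 1).toNat = E.length := by omega
    rw [PySem.List.pyRange_one, hlen]
  have hMle : pvMax m T.length ≤ (E.length : Int) :=
    pvMax_le m (E.length : Int) (by positivity) (fun i => pvLcp_le_left E (T.drop i)) T.length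
  refine congrArg (fun st : Int × Int =>
    if (st.1 == 0) = true then ([-1, -1] : List Int) else [st.2, st.2 + st.1 - 1]) ?_
  rw [hrange, List.foldl_map]
  refine (afold E T E.length le_rfl).trans ?_
  rw [min_eq_right hMle]
  exact ((bfold m T.length).trans (by rw [pvArg_char])).symm
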